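-- pv_equiv track=rewrite | github.com/Part-time-Ray/vision_compression | final/jpeg_core.py | generate_zigzag_order
-- ===== SOURCE A (Python) =====
-- def generate_zigzag_order(n=8):
--     """Generate zigzag scan order for 8x8 block"""
--     zigzag_order = []
--     for d in range(2 * n - 1):
--         start_r = max(0, d - (n - 1))
--         end_r = min(d, n - 1) + 1
--         positions = [(r, d - r) for r in range(start_r, end_r)]
--         if d % 2 == 0:
--             positions = positions[::-1]
--         zigzag_order.extend(positions)
--     return zigzag_order
-- ===== SOURCE B (Python) =====
-- def generate_zigzag_order(n=8):
--     """Generate zigzag scan order by simulating the zigzag walk."""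
--     if n <= 0:
--         return []
--     order = []
--     r = c = 0
--     up = True
--     for _ in range(n * n):
--         order.append((r, c))
--         if up:
--             if c == n - 1:
--                 r += 1
--                 up = False
--             elif r == 0:
--                 c += 1
--                 up = False
--             else:
--                 r -= 1
--                 c += 1
--         else:
--             if r == n - 1:
--                 c += 1
--                 up = True
--             elif c == 0:
--                 r += 1
--                 up = True
--             else:
--                 r += 1
--                 c -= 1
--     return order
-- ===== Notes on version B (the rewrite author's own statement) =====
-- stated objective: alternative
-- what changed: Replaces A's per-antidiagonal list building (range per diagonal, reversed on even diagonals, extended into the result) by a direct simulation of the zigzag walk that keeps only the current position and direction and appends one cell per iteration.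
import Mathlib
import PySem

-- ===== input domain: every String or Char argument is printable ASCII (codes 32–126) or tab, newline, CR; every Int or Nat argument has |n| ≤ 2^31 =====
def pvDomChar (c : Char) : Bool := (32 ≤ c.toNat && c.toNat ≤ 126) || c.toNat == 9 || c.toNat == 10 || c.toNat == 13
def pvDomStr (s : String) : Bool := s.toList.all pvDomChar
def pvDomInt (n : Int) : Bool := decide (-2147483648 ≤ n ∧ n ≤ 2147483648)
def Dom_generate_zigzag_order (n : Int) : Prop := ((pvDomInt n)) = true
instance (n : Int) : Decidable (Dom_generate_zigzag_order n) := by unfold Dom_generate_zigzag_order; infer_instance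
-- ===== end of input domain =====

-- B replaces A's per-antidiagonal construction by a direct walk simulation (alternative decomposition, same cost).

-- ===== PORT A =====
def generate_zigzag_order (n : Int) : List (Int × Int) :=
  (PySem.List.pyRange 0 (2 * n - 1) 1).foldl (fun zigzag_order d =>
    let start_r := max 0 (d - (n - 1))
    let end_r := min d (n - 1) + 1
    let positions := (PySem.List.pyRange start_r end_r 1).map (fun r => (r, d - r))
    let positions := if PySem.Int.mod d 2 == 0 then (PySem.List.slice? positions none none (-1)).getD [] else positions
    zigzag_order ++ positions) []

-- ===== PORT B =====
def zigzagWalk (n : Int) : Nat → Int → Int → Bool → List (Int × Int) → List (Int × Int)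
  | 0, _, _, _, order => order
  | fuel + 1, r, c, up, order =>
    let order := order ++ [(r, c)]
    if up then
      if c == n - 1 then zigzagWalk n fuel (r + 1) c false order
      else if r == 0 then zigzagWalk n fuel r (c + 1) false order
      else zigzagWalk n fuel (r - 1) (c + 1) true order
    else
      if r == n - 1 then zigzagWalk n fuel r (c + 1) true order
      else if c == 0 then zigzagWalk n fuel (r + 1) c true order
      else zigzagWalk n fuel (r + 1) (c - 1) false order

def generate_zigzag_order_alt (n : Int) : List (Int × Int) :=
  if n ≤ 0 then [] else zigzagWalk n (n * n).toNat 0 0 true []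

-- ===== PRECONDITION & SPEC =====
def Spec_generate_zigzag_order (n : Int) (out : List (Int × Int)) : Prop := out = generate_zigzag_order_alt n
instance (n : Int) (out : List (Int × Int)) : Decidable (Spec_generate_zigzag_order n out) := by unfold Spec_generate_zigzag_order; infer_instance

-- ===== CLAIM (what is proved, stated in full; the proofs are below) =====
def Claim_equal_generate_zigzag_order : Prop := ∀ (n : Int), Dom_generate_zigzag_order n → Spec_generate_zigzag_order n (generate_zigzag_order n)

-- ===== LEMMAS AND PROOFS =====

-- A's diagonal d, in the order A emits it.
def diagA (n d : Int) : List (Int × Int) :=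
  if d % 2 == 0 then ((PySem.List.pyRange (max 0 (d - (n - 1))) (min d (n - 1) + 1) 1).map (fun r => (r, d - r))).reverse
  else (PySem.List.pyRange (max 0 (d - (n - 1))) (min d (n - 1) + 1) 1).map (fun r => (r, d - r))

-- number of cells on diagonal d
def lenD (n d : Int) : Nat := (min d (n - 1) + 1 - max 0 (d - (n - 1))).toNat

-- row at which the walk enters diagonal d
def startR (n d : Int) : Int := if d % 2 == 0 then min d (n - 1) else max 0 (d - (n - 1))

-- total number of cells on diagonals d, d+1, …, 2n-2
def fuelFrom (n d : Int) : Nat :=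
  if _h : d < 2 * n - 1 then lenD n d + fuelFrom n (d + 1) else 0
termination_by (2 * n - 1 - d).toNat
decreasing_by omega

lemma gz_eq_flatMap (n : Int) :
    generate_zigzag_order n = (PySem.List.pyRange 0 (2 * n - 1) 1).flatMap (diagA n) := by
  unfold generate_zigzag_order
  simp only [PySem.List.slice?_none_none_neg_one, Option.getD_some]
  have h : ∀ (acc : List (Int × Int)) (d : Int),
      (fun (zigzag_order : List (Int × Int)) d =>
        let start_r := max 0 (d - (n - 1))
        let end_r := min d (n - 1) + 1
        let positions := (PySem.List.pyRange start_r end_r 1).map (fun r => (r, d - r))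
        let positions := if PySem.Int.mod d 2 == 0 then positions.reverse else positions
        zigzag_order ++ positions) acc d = acc ++ diagA n d := by
    intro acc d
    simp only [diagA, PySem.Int.mod_eq_emod_of_pos (a := d) (by norm_num : (0:Int) < 2)]
  simp only [h]
  exact PySem.List.foldl_append_eq_flatMap (diagA n) (PySem.List.pyRange 0 (2 * n - 1) 1) []

lemma walk_acc (n : Int) : ∀ (f : Nat) (r c : Int) (up : Bool) (acc : List (Int × Int)),
    zigzagWalk n f r c up acc = acc ++ zigzagWalk n f r c up [] := by
  intro f
  induction f with
  | zero => intro r c up acc; simp [zigzagWalk]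
  | succ f ih =>
    intro r c up acc
    simp only [zigzagWalk]
    split_ifs <;>
      (simp only [List.nil_append]; rw [ih, ih (acc := [(r, c)])]; simp)

-- single-step unfoldings of the walk
lemma wstep1 (n : Int) (f : Nat) (r c : Int) (acc : List (Int × Int)) (h : c = n - 1) :
    zigzagWalk n (f + 1) r c true acc = zigzagWalk n f (r + 1) c false (acc ++ [(r, c)]) := by
  simp [zigzagWalk, h]

lemma wstep2 (n : Int) (f : Nat) (r c : Int) (acc : List (Int × Int)) (h1 : c ≠ n - 1) (h2 : r = 0) :
    zigzagWalk n (f + 1) r c true acc = zigzagWalk n f r (c + 1) false (acc ++ [(r, c)]) := by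
  simp [zigzagWalk, h1, h2]

lemma wstep3 (n : Int) (f : Nat) (r c : Int) (acc : List (Int × Int)) (h1 : c ≠ n - 1) (h2 : r ≠ 0) :
    zigzagWalk n (f + 1) r c true acc = zigzagWalk n f (r - 1) (c + 1) true (acc ++ [(r, c)]) := by
  simp [zigzagWalk, h1, h2]

lemma wstep4 (n : Int) (f : Nat) (r c : Int) (acc : List (Int × Int)) (h : r = n - 1) :
    zigzagWalk n (f + 1) r c false acc = zigzagWalk n f r (c + 1) true (acc ++ [(r, c)]) := by
  simp [zigzagWalk, h]

lemma wstep5 (n : Int) (f : Nat) (r c : Int) (acc : List (Int × Int)) (h1 : r ≠ n - 1) (h2 : c = 0) :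
    zigzagWalk n (f + 1) r c false acc = zigzagWalk n f (r + 1) c true (acc ++ [(r, c)]) := by
  simp [zigzagWalk, h1, h2]

lemma wstep6 (n : Int) (f : Nat) (r c : Int) (acc : List (Int × Int)) (h1 : r ≠ n - 1) (h2 : c ≠ 0) :
    zigzagWalk n (f + 1) r c false acc = zigzagWalk n f (r + 1) (c - 1) false (acc ++ [(r, c)]) := by
  simp [zigzagWalk, h1, h2]

-- one diagonal of the walk, even case (moving up-right)
lemma walk_diag_even (n d : Int) (hn : 1 ≤ n) (hd0 : 0 ≤ d) (hd : d ≤ 2 * n - 2)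
    (hpar : d % 2 = 0) :
    ∀ (k : Nat) (r : Int), r = max 0 (d - (n - 1)) + k → r ≤ min d (n - 1) → ∀ (g : Nat),
    zigzagWalk n (k + 1 + g) r (d - r) true [] =
      ((PySem.List.pyRange (max 0 (d - (n - 1))) (r + 1) 1).map (fun r => (r, d - r))).reverse ++
        zigzagWalk n g (startR n (d + 1)) ((d + 1) - startR n (d + 1)) false [] := by
  have hs : startR n (d + 1) = max 0 (d + 1 - (n - 1)) := by
    unfold startR
    have h1 : (d + 1) % 2 = 1 := by omega
    simp [h1]
  intro k
  induction k with
  | zero =>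
    intro r hr hrle g
    rw [← (by omega : r = max 0 (d - (n - 1))), (by omega : 0 + 1 + g = g + 1), hs]
    by_cases hreg : n - 1 ≤ d
    · rw [wstep1 n g r (d - r) [] (by omega)]
      simp only [List.nil_append]
      rw [walk_acc]
      rw [show max 0 (d + 1 - (n - 1)) = r + 1 by omega]
      rw [show d + 1 - (r + 1) = d - r by ring]
      simp [PySem.List.pyRange_one_singleton]
    · rw [wstep2 n g r (d - r) [] (by omega) (by omega)]
      simp only [List.nil_append]
      rw [walk_acc]
      rw [show max 0 (d + 1 - (n - 1)) = r by omega]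
      rw [show d + 1 - r = d - r + 1 by ring]
      simp [PySem.List.pyRange_one_singleton]
  | succ k ih =>
    intro r hr hrle g
    rw [(by omega : k + 1 + 1 + g = (k + 1 + g) + 1)]
    rw [wstep3 n (k + 1 + g) r (d - r) [] (by omega) (by omega)]
    simp only [List.nil_append]
    rw [walk_acc]
    rw [show d - r + 1 = d - (r - 1) by ring]
    rw [ih (r - 1) (by omega) (by omega) g]
    rw [show r + 1 = (r - 1 + 1) + 1 by ring] 
    rw [PySem.List.pyRange_one_succ_right (by omega : max 0 (d - (n - 1)) ≤ r - 1 + 1)]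
    simp

-- one diagonal of the walk, odd case (moving down-left)
lemma walk_diag_odd (n d : Int) (hn : 1 ≤ n) (hd0 : 0 ≤ d) (hd : d ≤ 2 * n - 2)
    (hpar : d % 2 = 1) :
    ∀ (k : Nat) (r : Int), r = min d (n - 1) - k → max 0 (d - (n - 1)) ≤ r → ∀ (g : Nat),
    zigzagWalk n (k + 1 + g) r (d - r) false [] =
      (PySem.List.pyRange r (min d (n - 1) + 1) 1).map (fun r => (r, d - r)) ++
        zigzagWalk n g (startR n (d + 1)) ((d + 1) - startR n (d + 1)) true [] := by
  have hs : startR n (d + 1) = min (d + 1) (n - 1) := by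
    unfold startR
    have h1 : (d + 1) % 2 = 0 := by omega
    simp [h1]
  intro k
  induction k with
  | zero =>
    intro r hr hrge g
    rw [show min d (n - 1) + 1 = r + 1 by omega, (by omega : 0 + 1 + g = g + 1), hs]
    by_cases hreg : n - 1 ≤ d
    · rw [wstep4 n g r (d - r) [] (by omega)]
      simp only [List.nil_append]
      rw [walk_acc]
      rw [show min (d + 1) (n - 1) = r by omega]
      rw [show d + 1 - r = d - r + 1 by ring]
      simp [PySem.List.pyRange_one_singleton]
    · rw [wstep5 n g r (d - r) [] (by omega) (by omega)]
      simp only [List.nil_append]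
      rw [walk_acc]
      rw [show min (d + 1) (n - 1) = r + 1 by omega]
      rw [show d + 1 - (r + 1) = d - r by ring]
      simp [PySem.List.pyRange_one_singleton]
  | succ k ih =>
    intro r hr hrge g
    rw [(by omega : k + 1 + 1 + g = (k + 1 + g) + 1)]
    rw [wstep6 n (k + 1 + g) r (d - r) [] (by omega) (by omega)]
    simp only [List.nil_append]
    rw [walk_acc]
    rw [show d - r - 1 = d - (r + 1) by ring]
    rw [ih (r + 1) (by omega) (by omega) g]
    rw [PySem.List.pyRange_one_cons (by omega : r < min d (n - 1) + 1)]
    simp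

-- one diagonal, both parities, fuel = lenD + g
lemma walk_diag (n d : Int) (hn : 1 ≤ n) (hd0 : 0 ≤ d) (hd : d ≤ 2 * n - 2) (g : Nat) :
    zigzagWalk n (lenD n d + g) (startR n d) (d - startR n d) (d % 2 == 0) [] =
      diagA n d ++ zigzagWalk n g (startR n (d + 1)) ((d + 1) - startR n (d + 1)) ((d + 1) % 2 == 0) [] := by
  have hminmax : max 0 (d - (n - 1)) ≤ min d (n - 1) := by omega
  have hlen : lenD n d = (min d (n - 1) - max 0 (d - (n - 1))).toNat + 1 := by
    unfold lenD; omega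
  rcases Int.emod_two_eq_zero_or_one d with hpar | hpar
  · have hb : (d % 2 == 0) = true := by rw [beq_iff_eq]; omega
    have hb1 : ((d + 1) % 2 == 0) = false := by rw [beq_eq_false_iff_ne]; omega
    have hstart : startR n d = min d (n - 1) := by unfold startR; simp [hpar]
    rw [hb, hb1, hstart, hlen]
    have := walk_diag_even n d hn hd0 hd hpar ((min d (n - 1) - max 0 (d - (n - 1))).toNat)
      (min d (n - 1)) (by omega) le_rfl g
    rw [this]
    unfold diagA
    have : (d % 2 == 0) = true := hb
    simp [this]
  · have hb : (d % 2 == 0) = false := by rw [beq_eq_false_iff_ne]; omega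
    have hb1 : ((d + 1) % 2 == 0) = true := by rw [beq_iff_eq]; omega
    have hstart : startR n d = max 0 (d - (n - 1)) := by unfold startR; simp [hpar]
    rw [hb, hb1, hstart, hlen]
    have := walk_diag_odd n d hn hd0 hd hpar ((min d (n - 1) - max 0 (d - (n - 1))).toNat)
      (max 0 (d - (n - 1))) (by omega) le_rfl g
    rw [this]
    unfold diagA
    simp [hb]

-- chaining the diagonals
lemma walk_chain (n : Int) (hn : 1 ≤ n) :
    ∀ (k : Nat) (d : Int), d = 2 * n - 1 - k → 0 ≤ d →
    zigzagWalk n (fuelFrom n d) (startR n d) (d - startR n d) (d % 2 == 0) [] =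
      (PySem.List.pyRange d (2 * n - 1) 1).flatMap (diagA n) := by
  intro k
  induction k with
  | zero =>
    intro d hdk hd0
    have hdend : ¬ d < 2 * n - 1 := by omega
    rw [fuelFrom, dif_neg hdend, PySem.List.pyRange_one_eq_nil (by omega)]
    simp [zigzagWalk]
  | succ k ih =>
    intro d hdk hd0
    have hdlt : d < 2 * n - 1 := by omega
    rw [fuelFrom, dif_pos hdlt]
    rw [walk_diag n d hn hd0 (by omega) (fuelFrom n (d + 1))]
    rw [ih (d + 1) (by omega) (by omega)]
    rw [PySem.List.pyRange_one_cons (by omega : d < 2 * n - 1)]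
    simp

-- total fuel: closed form
lemma fuel_closed (n : Int) (hn : 1 ≤ n) :
    ∀ (k : Nat) (d : Int), d = 2 * n - 1 - k → 0 ≤ d →
    2 * (fuelFrom n d : Int) = if n - 1 ≤ d then (2 * n - 1 - d) * (2 * n - d) else 2 * n * n - d * (d + 1) := by
  intro k
  induction k with
  | zero =>
    intro d hdk hd0
    have hdend : ¬ d < 2 * n - 1 := by omega
    rw [fuelFrom, dif_neg hdend, if_pos (by omega)]
    have : d = 2 * n - 1 := by omega
    subst this
    push_cast
    ring
  | succ k ih =>
    intro d hdk hd0
    have hdlt : d < 2 * n - 1 := by omega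
    rw [fuelFrom, dif_pos hdlt]
    have hih := ih (d + 1) (by omega) (by omega)
    have hlen : (lenD n d : Int) = min d (n - 1) + 1 - max 0 (d - (n - 1)) := by
      unfold lenD; omega
    push_cast
    rw [hlen]
    by_cases hreg : n - 1 ≤ d
    · rw [if_pos hreg]
      rw [if_pos (by omega)] at hih
      have hmin : min d (n - 1) = n - 1 := by omega
      have hmax : max 0 (d - (n - 1)) = d - (n - 1) := by omega
      rw [hmin, hmax]
      linear_combination hih
    · rw [if_neg hreg]
      have hmin : min d (n - 1) = d := by omega
      have hmax : max 0 (d - (n - 1)) = 0 := by omega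
      rw [hmin, hmax]
      by_cases hreg1 : n - 1 ≤ d + 1
      · rw [if_pos hreg1] at hih
        have : d = n - 2 := by omega
        subst this
        linear_combination hih
      · rw [if_neg hreg1] at hih
        linear_combination hih
    
lemma fuel_total (n : Int) (hn : 1 ≤ n) : fuelFrom n 0 = (n * n).toNat := by
  have h := fuel_closed n hn (2 * n - 1).toNat 0 (by omega) le_rfl
  have h2 : 2 * (fuelFrom n 0 : Int) = 2 * (n * n) := by
    by_cases hc : n - 1 ≤ (0:Int)
    · rw [if_pos hc] at h
      have hn1 : n = 1 := by omega
      subst hn1; norm_num at h ⊢; omega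
    · rw [if_neg hc] at h
      rw [h]; ring
  have h3 : (fuelFrom n 0 : Int) = n * n := by linarith
  omega

-- ===== VERDICT (by name: the statement is the Claim_ definition above) =====
theorem generate_zigzag_order_spec : Claim_equal_generate_zigzag_order := by
  intro n _
  unfold Spec_generate_zigzag_order generate_zigzag_order_alt
  rw [gz_eq_flatMap]
  by_cases hn : n ≤ 0
  · rw [if_pos hn, PySem.List.pyRange_one_eq_nil (by omega)]
    simp
  · rw [if_neg hn]
    have hn1 : 1 ≤ n := by omega
    have := walk_chain n hn1 (2 * n - 1).toNat 0 (by omega) le_rfl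
    have hs : startR n 0 = 0 := by unfold startR; simp; omega
    rw [hs] at this
    have hb : ((0:Int) % 2 == 0) = true := by decide
    rw [hb] at this
    simp only [sub_zero] at this
    rw [← fuel_total n hn1, this]
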